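-- pv_equiv track=rewrite | github.com/wyy0128/rental-product-recommendation | pytorch_sasrec_full.py | build_item_vocab
-- ===== SOURCE A (Python) =====
-- def build_item_vocab(train_session_items):
--     # only from train items; unseen in train cannot be predicted by DL model -> fallback will cover
--     items = set()
--     for (_p,_v), seq in train_session_items.items():
--         for it in seq:
--             if it:
--                 items.add(it)
--     items = sorted(items)
--     # 0: PAD
--     item2idx = {it: (i+1) for i, it in enumerate(items)}
--     idx2item = {i+1: it for i, it in enumerate(items)}
--     return item2idx, idx2item
-- ===== SOURCE B (Python) =====
-- def build_item_vocab(train_session_items):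
--     # Alternative: flatten all non-falsy items, sort the whole pool, then one linear
--     # dedup pass over the sorted list emitting 1-based indices (0 stays PAD); no set kept.
--     pool = []
--     for (_p, _v), seq in train_session_items.items():
--         for it in seq:
--             if it:
--                 pool.append(it)
--     pool.sort()
--     pairs = []
--     prev = None
--     i = 0
--     for it in pool:
--         if it != prev:
--             i += 1
--             pairs.append((it, i))
--             prev = it
--     return dict(pairs), {i: it for it, i in pairs}
-- ===== Notes on version B (the rewrite author's own statement) =====
-- stated objective: alternative
-- what changed: Replaces the set-dedup-then-sort-then-two-enumerate-comprehensions with sort-the-full-pool-then-one-linear-dedup-pass that emits (item, index) pairs directly, maintaining no set.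
import Mathlib
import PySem

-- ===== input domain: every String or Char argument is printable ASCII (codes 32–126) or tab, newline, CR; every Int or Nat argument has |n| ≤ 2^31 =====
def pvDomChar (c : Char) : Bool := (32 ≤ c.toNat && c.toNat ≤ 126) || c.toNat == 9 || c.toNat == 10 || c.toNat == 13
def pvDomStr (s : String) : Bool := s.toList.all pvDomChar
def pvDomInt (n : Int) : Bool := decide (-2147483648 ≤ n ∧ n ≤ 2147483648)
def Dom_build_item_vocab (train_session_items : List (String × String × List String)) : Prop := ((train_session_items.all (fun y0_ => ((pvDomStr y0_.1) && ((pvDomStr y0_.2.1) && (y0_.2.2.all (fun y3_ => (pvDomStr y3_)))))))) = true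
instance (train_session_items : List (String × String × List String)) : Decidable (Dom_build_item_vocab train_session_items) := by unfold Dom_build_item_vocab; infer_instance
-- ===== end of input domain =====

-- B replaces A's set-dedup + sorted + enumerate comprehensions with sort-the-full-pool
-- followed by one linear dedup pass emitting (item, index) pairs; alternative, not faster.

-- ===== PORT A =====
def build_item_vocab (train_session_items : List (String × String × List String)) : (List (String × Int)) × (List (Int × String)) :=
  let items : PySem.Set String := train_session_items.foldl
    (fun s e => e.2.2.foldl (fun s it => if it ≠ "" then PySem.Set.add s it else s) s)
    PySem.Set.empty
  let itemsS := PySem.List.sorted items (fun x => x) false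
  let item2idx := PySem.Dict.ofList ((PySem.List.enumerate itemsS 0).map (fun p => (p.2, p.1 + 1)))
  let idx2item := PySem.Dict.ofList ((PySem.List.enumerate itemsS 0).map (fun p => (p.1 + 1, p.2)))
  (item2idx.items, idx2item.items)

-- ===== PORT B =====
def build_item_vocab_alt (train_session_items : List (String × String × List String)) : (List (String × Int)) × (List (Int × String)) :=
  let pool := train_session_items.foldl
    (fun acc e => e.2.2.foldl (fun acc it => if it ≠ "" then acc ++ [it] else acc) acc)
    []
  let pools := PySem.List.sorted pool (fun x => x) false
  let st := pools.foldl
    (fun (st : List (String × Int) × Option String × Int) it =>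
      if some it = st.2.1 then st else (st.1 ++ [(it, st.2.2 + 1)], some it, st.2.2 + 1))
    ([], none, 0)
  let pairs := st.1
  ((PySem.Dict.ofList pairs).items,
   (PySem.Dict.ofList (pairs.map (fun q => (q.2, q.1)))).items)

-- ===== PRECONDITION & SPEC =====
def Spec_build_item_vocab (train_session_items : List (String × String × List String)) (out : (List (String × Int)) × (List (Int × String))) : Prop := out = build_item_vocab_alt train_session_items
instance (train_session_items : List (String × String × List String)) (out : (List (String × Int)) × (List (Int × String))) : Decidable (Spec_build_item_vocab train_session_items out) := by unfold Spec_build_item_vocab; infer_instance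

-- ===== CLAIM (what is proved, stated in full; the proofs are below) =====
def Claim_equal_build_item_vocab : Prop := ∀ (train_session_items : List (String × String × List String)), Dom_build_item_vocab train_session_items → Spec_build_item_vocab train_session_items (build_item_vocab train_session_items)

-- ===== LEMMAS AND PROOFS =====

-- B's dedup pass, abstracted for the proof
def dpass : Option String → List String → List String
  | _, [] => []
  | prev, x :: xs => if some x = prev then dpass prev xs else x :: dpass (some x) xs

-- inner loops: A's set fold agrees with set-of B's append fold
lemma inner_pool (seq : List String) : ∀ (acc : List String),
    seq.foldl (fun s it => if it ≠ "" then PySem.Set.add s it else s) (PySem.Set.ofList acc)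
      = PySem.Set.ofList (seq.foldl (fun acc it => if it ≠ "" then acc ++ [it] else acc) acc) := by
  induction seq with
  | nil => intro acc; rfl
  | cons x xs ih =>
    intro acc
    by_cases hx : x ≠ ""
    · have hadd : PySem.Set.add (PySem.Set.ofList acc) x = PySem.Set.ofList (acc ++ [x]) := by
        simp [PySem.Set.ofList_eq_foldl, List.foldl_append]
      rw [List.foldl_cons, List.foldl_cons, if_pos hx, if_pos hx, hadd]
      exact ih (acc ++ [x])
    · rw [List.foldl_cons, List.foldl_cons, if_neg hx, if_neg hx]
      exact ih acc

lemma outer_pool (t : List (String × String × List String)) : ∀ (acc : List String),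
    t.foldl (fun s e => e.2.2.foldl (fun s it => if it ≠ "" then PySem.Set.add s it else s) s)
        (PySem.Set.ofList acc)
      = PySem.Set.ofList
        (t.foldl (fun acc e => e.2.2.foldl (fun acc it => if it ≠ "" then acc ++ [it] else acc) acc) acc) := by
  induction t with
  | nil => intro acc; rfl
  | cons e t ih =>
    intro acc
    rw [List.foldl_cons, List.foldl_cons, inner_pool]
    exact ih _

-- B's pair-building fold, characterised by dpass + enumerate
lemma fold_pairs (xs : List String) : ∀ (pairs : List (String × Int)) (prev : Option String) (i : Int),
    (xs.foldl (fun (st : List (String × Int) × Option String × Int) it =>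
        if some it = st.2.1 then st else (st.1 ++ [(it, st.2.2 + 1)], some it, st.2.2 + 1))
      (pairs, prev, i)).1
      = pairs ++ (PySem.List.enumerate (dpass prev xs) (i + 1)).map (fun p => (p.2, p.1)) := by
  induction xs with
  | nil => intro pairs prev i; simp [dpass, PySem.List.enumerate_nil]
  | cons x xs ih =>
    intro pairs prev i
    by_cases hx : some x = prev
    · rw [List.foldl_cons, if_pos hx, dpass, if_pos hx]
      exact ih pairs prev i
    · rw [List.foldl_cons, if_neg hx, dpass, if_neg hx, PySem.List.enumerate_cons]
      rw [ih (pairs ++ [(x, i + 1)]) (some x) (i + 1)]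
      simp

-- dpass of a (≤)-sorted list: strictly increasing, and membership is "in xs and ≠ prev"
lemma dpass_props (xs : List String) : ∀ (prev : Option String),
    xs.Pairwise (· ≤ ·) →
    (∀ p, prev = some p → ∀ y ∈ xs, p ≤ y) →
    (dpass prev xs).Pairwise (· < ·) ∧ (∀ a, a ∈ dpass prev xs ↔ a ∈ xs ∧ prev ≠ some a) := by
  induction xs with
  | nil => intro prev _ _; simp [dpass]
  | cons x xs ih =>
    intro prev hp hprev
    have hx_le : ∀ y ∈ xs, x ≤ y := fun y hy => (List.pairwise_cons.mp hp).1 y hy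
    have hp' : xs.Pairwise (· ≤ ·) := (List.pairwise_cons.mp hp).2
    by_cases hx : some x = prev
    · have hres := ih prev hp' (fun p hpe y hy => hprev p hpe y (List.mem_cons_of_mem _ hy))
      rw [dpass, if_pos hx]
      refine ⟨hres.1, ?_⟩
      intro a
      rw [hres.2 a, List.mem_cons]
      constructor
      · rintro ⟨ha, hne⟩; exact ⟨Or.inr ha, hne⟩
      · rintro ⟨ha | ha, hne⟩
        · exact absurd (by rw [ha]; exact hx.symm) hne
        · exact ⟨ha, hne⟩
    · have hres := ih (some x) hp' (by
        intro p hpe y hy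
        obtain rfl : x = p := by injection hpe
        exact hx_le y hy)
      rw [dpass, if_neg hx]
      constructor
      · rw [List.pairwise_cons]
        refine ⟨?_, hres.1⟩
        intro a ha
        have h2 := (hres.2 a).mp ha
        refine lt_of_le_of_ne (hx_le a h2.1) ?_
        intro h; exact h2.2 (by rw [h])
      · intro a
        rw [List.mem_cons, List.mem_cons, hres.2 a]
        constructor
        · rintro (rfl | ⟨ha, hne⟩)
          · exact ⟨Or.inl rfl, fun h => hx h.symm⟩
          · refine ⟨Or.inr ha, fun h => ?_⟩
            have h1 : a ≤ x := hprev a h x (by simp)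
            have h2 : x ≤ a := hx_le a ha
            exact hne (by rw [le_antisymm h2 h1])
        · rintro ⟨ha | ha, hne⟩
          · exact Or.inl ha
          · by_cases hax : a = x
            · exact Or.inl hax
            · exact Or.inr ⟨ha, fun h => hax (by injection h with h'; exact h'.symm)⟩

-- dpass of the sorted pool IS sorted(set(pool))
lemma dpass_sorted_pool (pool : List String) :
    dpass none (PySem.List.sorted pool (fun x => x) false)
      = PySem.List.sorted (PySem.Set.ofList pool) (fun x => x) false := by
  set sp := PySem.List.sorted pool (fun x => x) false with hsp
  have hpair : sp.Pairwise (· ≤ ·) := PySem.List.sorted_pairwise pool (fun x => x)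
  have hd := dpass_props sp none hpair (by simp)
  have hlt : (dpass none sp).Pairwise (· < ·) := hd.1
  have hperm : (dpass none sp).Perm (PySem.Set.ofList pool) := by
    rw [List.perm_ext_iff_of_nodup (hlt.imp ne_of_lt) (PySem.Set.nodup_ofList pool)]
    intro a
    rw [hd.2 a, PySem.Set.mem_ofList]
    simp [hsp, PySem.List.mem_sorted]
  exact (PySem.List.sorted_eq_of_perm_of_pairwise_lt (PySem.Set.ofList pool) _ (fun x => x) hperm hlt).symm

-- shifting enumerate's start by one
lemma enumerate_shift {α : Type} (u : List α) : ∀ (s : Int),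
    PySem.List.enumerate u (s + 1) = (PySem.List.enumerate u s).map (fun p => (p.1 + 1, p.2)) := by
  induction u with
  | nil => intro s; simp [PySem.List.enumerate_nil]
  | cons x u ih =>
    intro s
    rw [PySem.List.enumerate_cons, PySem.List.enumerate_cons, List.map_cons, ih (s + 1)]

-- ===== VERDICT (by name: the statement is the Claim_ definition above) =====
theorem build_item_vocab_spec : Claim_equal_build_item_vocab := by
  intro t _
  show build_item_vocab t = build_item_vocab_alt t
  unfold build_item_vocab build_item_vocab_alt
  simp only
  rw [show (PySem.Set.empty : PySem.Set String) = PySem.Set.ofList [] from rfl, outer_pool,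
      fold_pairs]
  rw [show ((0 : Int) + 1) = (0 + 1 : Int) from rfl, enumerate_shift, dpass_sorted_pool]
  simp only [List.map_map, List.nil_append]
  rfl
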